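-- pv_equiv track=rewrite | github.com/albrunj/production_database_scripts | strips/sensors/sensor_tests_interfacing_functions_itkdb/SENSOR_STRIPTEST_Analysis.py | CheckMultipleOfProbeCard
-- ===== SOURCE A (Python) =====
-- ProbeCardN = 32 #Number of channels the probe card scans at a time
--
-- MaxNumberCoincidences = 2 #Maximum number of times bad channels can be separated by a multiple of ProbeCardN before being flagged.
--
-- def CheckMultipleOfProbeCard (BadChannelList):
--     """ Returns a list of bad channels multiples if More than MaxNumberCoincidences, e.g [[1, 33, 65], [2, 34, 66], [3, 35, 67]]"""
--     ProbeCardDiffChannels = []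
--     for BadChannel in BadChannelList:
--         #Check not already in list
--         if not any(BadChannel in MultipleList for MultipleList in ProbeCardDiffChannels):
--             MultiplesForChannel = [BadChannel]
--             RestofList = BadChannelList[BadChannelList.index(BadChannel)+1:]
--             for OtherChannel in RestofList:
--                 Difference = (OtherChannel - BadChannel) / ProbeCardN
--                 if (Difference).is_integer():
--                     MultiplesForChannel.append(OtherChannel)
--             if len(MultiplesForChannel) > MaxNumberCoincidences:
--                 ProbeCardDiffChannels.append(MultiplesForChannel)
--
--     return ProbeCardDiffChannels
-- ===== SOURCE B (Python) =====
-- ProbeCardN = 32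
--
-- MaxNumberCoincidences = 2
--
-- def CheckMultipleOfProbeCard(BadChannelList):
--     """ Returns a list of bad channels multiples if More than MaxNumberCoincidences, e.g [[1, 33, 65], [2, 34, 66], [3, 35, 67]]"""
--     groups = {}
--     for channel in BadChannelList:
--         groups.setdefault(channel % ProbeCardN, []).append(channel)
--     return [g for g in groups.values() if len(g) > MaxNumberCoincidences]
-- ===== Notes on version B (the rewrite author's own statement) =====
-- stated objective: faster
-- what changed: Replaced the quadratic scan (for each unvisited channel, re-scan the rest of the list for congruent channels and check membership in already-built groups) by a single pass that buckets every channel into an insertion-ordered dict keyed by channel % 32, then keeps the buckets with more than 2 elements.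
import Mathlib
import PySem

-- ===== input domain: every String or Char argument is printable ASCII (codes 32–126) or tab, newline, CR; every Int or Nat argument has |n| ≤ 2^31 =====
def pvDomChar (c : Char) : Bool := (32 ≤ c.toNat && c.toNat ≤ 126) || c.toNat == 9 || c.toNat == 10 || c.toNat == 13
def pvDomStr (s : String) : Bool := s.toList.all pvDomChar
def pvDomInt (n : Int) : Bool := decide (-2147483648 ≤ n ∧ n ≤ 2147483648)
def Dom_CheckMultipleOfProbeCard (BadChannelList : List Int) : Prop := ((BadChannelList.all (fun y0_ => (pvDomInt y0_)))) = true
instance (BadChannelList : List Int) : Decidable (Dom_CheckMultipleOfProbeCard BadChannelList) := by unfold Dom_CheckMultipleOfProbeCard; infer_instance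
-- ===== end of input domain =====

-- B replaces A's quadratic rescan by one-pass bucketing into a dict keyed by channel % 32.

-- ===== PORT A =====
-- '(OtherChannel - BadChannel) / 32 .is_integer()' is ported as '(OtherChannel - BadChannel) % 32 == 0':
-- exact on the stated domain, where |difference| ≤ 2^32 < 2^53 so the float division by 32 is exact.
def CheckMultipleOfProbeCard (BadChannelList : List Int) : List (List Int) :=
  BadChannelList.foldl (fun ProbeCardDiffChannels BadChannel =>
    if ProbeCardDiffChannels.any (fun MultipleList => MultipleList.contains BadChannel) then
      ProbeCardDiffChannels
    else
      let i := (PySem.List.index? BadChannelList BadChannel).getD 0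
      let RestofList := PySem.List.slice BadChannelList (some ((i : Int) + 1)) none
      let MultiplesForChannel := RestofList.foldl
        (fun m OtherChannel =>
          if PySem.Int.mod (OtherChannel - BadChannel) 32 == 0 then m ++ [OtherChannel] else m)
        [BadChannel]
      if MultiplesForChannel.length > 2 then ProbeCardDiffChannels ++ [MultiplesForChannel]
      else ProbeCardDiffChannels) []

-- ===== PORT B =====
def CheckMultipleOfProbeCard_alt (BadChannelList : List Int) : List (List Int) :=
  let groups := BadChannelList.foldl
    (fun d channel => d.modify (PySem.Int.mod channel 32) [] (· ++ [channel])) PySem.Dict.empty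
  groups.values.filter (fun g => decide (2 < g.length))

-- ===== PRECONDITION & SPEC =====
def Spec_CheckMultipleOfProbeCard (BadChannelList : List Int) (out : List (List Int)) : Prop := out = CheckMultipleOfProbeCard_alt BadChannelList
instance (BadChannelList : List Int) (out : List (List Int)) : Decidable (Spec_CheckMultipleOfProbeCard BadChannelList out) := by unfold Spec_CheckMultipleOfProbeCard; infer_instance

-- ===== CLAIM (what is proved, stated in full; the proofs are below) =====
def Claim_equal_CheckMultipleOfProbeCard : Prop := ∀ (BadChannelList : List Int), Dom_CheckMultipleOfProbeCard BadChannelList → Spec_CheckMultipleOfProbeCard BadChannelList (CheckMultipleOfProbeCard BadChannelList)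

-- ===== LEMMAS AND PROOFS =====

-- residue of a channel
def pvR (x : Int) : Int := PySem.Int.mod x 32

-- the residue-class group of k inside xs
def pvGrp (xs : List Int) (k : Int) : List Int := xs.filter (fun x => pvR x == k)

-- A's accumulator after processing the prefix p of the full list xs:
-- one group per residue first seen in p, each the FULL residue class of xs, kept when longer than 2
def pvAcc (xs p : List Int) : List (List Int) :=
  ((PySem.Set.ofList (p.map pvR)).map (pvGrp xs)).filter (fun g => decide (2 < g.length))

-- A's loop body, named for the invariant proof (identical to the lambda in the port)
def pvStepA (BadChannelList : List Int) (ProbeCardDiffChannels : List (List Int)) (BadChannel : Int) : List (List Int) :=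
  if ProbeCardDiffChannels.any (fun MultipleList => MultipleList.contains BadChannel) then
    ProbeCardDiffChannels
  else
    let i := (PySem.List.index? BadChannelList BadChannel).getD 0
    let RestofList := PySem.List.slice BadChannelList (some ((i : Int) + 1)) none
    let MultiplesForChannel := RestofList.foldl
      (fun m OtherChannel =>
        if PySem.Int.mod (OtherChannel - BadChannel) 32 == 0 then m ++ [OtherChannel] else m)
      [BadChannel]
    if MultiplesForChannel.length > 2 then ProbeCardDiffChannels ++ [MultiplesForChannel]
    else ProbeCardDiffChannels

theorem pvA_eq_foldl (xs : List Int) :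
    CheckMultipleOfProbeCard xs = xs.foldl (pvStepA xs) [] := rfl

theorem pvCong (o c : Int) :
    (PySem.Int.mod (o - c) 32 == 0) = (pvR o == pvR c) := by
  simp only [pvR, PySem.Int.mod_eq_emod_of_pos (b := 32) (by norm_num)]
  rw [Bool.eq_iff_iff]
  simp [Int.emod_eq_emod_iff_emod_sub_eq_zero]

theorem pvAlt_eq (xs : List Int) :
    CheckMultipleOfProbeCard_alt xs = pvAcc xs xs := by
  unfold CheckMultipleOfProbeCard_alt pvAcc
  have hkeys : (xs.foldl (fun d channel => d.modify (PySem.Int.mod channel 32) [] (· ++ [channel])) PySem.Dict.empty).keys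
      = PySem.Set.ofList (xs.map pvR) := by
    have := PySem.Dict.keys_foldl_modify_key xs pvR ([] : List Int) (fun _ channel => (· ++ [channel])) PySem.Dict.empty
    simpa [pvR, PySem.Set.update_empty] using this
  have hnd : (xs.foldl (fun d channel => d.modify (PySem.Int.mod channel 32) [] (· ++ [channel])) PySem.Dict.empty).keys.Nodup := by
    rw [hkeys]; exact PySem.Set.nodup_ofList _
  have hgetD : ∀ k, (xs.foldl (fun d channel => d.modify (PySem.Int.mod channel 32) [] (· ++ [channel])) PySem.Dict.empty).getD k []
      = pvGrp xs k := by
    intro k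
    have hmap : xs.foldl (fun d channel => d.modify (PySem.Int.mod channel 32) [] (· ++ [channel])) PySem.Dict.empty
        = (xs.map (fun c => (pvR c, c))).foldl (fun d p => d.modify p.1 [] (· ++ [p.2])) PySem.Dict.empty := by
      rw [List.foldl_map]; rfl
    rw [hmap, PySem.Dict.getD_foldl_modify_append]
    simp only [Function.comp_def, List.filter_map, PySem.Dict.getD_empty]
    simp [pvGrp, Function.comp_def]
  show List.filter _ (List.foldl (fun d channel => d.modify (PySem.Int.mod channel 32) [] (· ++ [channel])) PySem.Dict.empty xs).values = _
  rw [PySem.Dict.values_eq_map_keys _ hnd []]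
  rw [hkeys]
  congr 1
  exact List.map_congr_left (fun k _ => hgetD k)

theorem pvMem_iff (xs p : List Int) (c : Int) (hcx : c ∈ xs) :
    ((pvAcc xs p).any (fun g => g.contains c) = true)
      ↔ (pvR c ∈ p.map pvR ∧ 2 < (pvGrp xs (pvR c)).length) := by
  simp only [pvAcc, List.any_eq_true, List.mem_filter, List.mem_map, PySem.Set.mem_ofList,
    decide_eq_true_eq, List.contains_iff_mem]
  constructor
  · rintro ⟨g, ⟨⟨k, hk, rfl⟩, hlen⟩, hcg⟩
    have : pvR c = k := by
      have := List.of_mem_filter hcg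
      simpa using this
    subst this
    exact ⟨hk, hlen⟩
  · rintro ⟨hk, hlen⟩
    exact ⟨pvGrp xs (pvR c), ⟨⟨pvR c, hk, rfl⟩, hlen⟩, List.mem_filter.mpr ⟨hcx, by simp⟩⟩

-- the group A builds for c: [c] followed by the same-residue channels after c's first occurrence
theorem pvMFC (xs : List Int) (c : Int) (j : Nat) (pre suf : List Int)
    (hsplit : xs = pre ++ c :: suf) (hj : pre.length = j) (hnp : c ∉ pre) :
    (PySem.List.slice xs (some (((((PySem.List.index? xs c).getD 0 : Nat)) : Int) + 1)) none).foldl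
      (fun m OtherChannel =>
        if PySem.Int.mod (OtherChannel - c) 32 == 0 then m ++ [OtherChannel] else m)
      [c]
    = c :: suf.filter (fun o => pvR o == pvR c) := by
  have hidx : PySem.List.index? xs c = some j :=
    (PySem.List.index?_eq_some_iff xs c j).mpr ⟨pre, suf, hsplit, hj, hnp⟩
  rw [hidx]
  have hcast : ((j : Int) + 1) = (((j + 1 : Nat)) : Int) := by push_cast; ring
  rw [Option.getD_some, hcast, PySem.List.slice_from_natCast]
  have hdrop : xs.drop (j + 1) = suf := by
    rw [hsplit, ← hj]
    have : pre ++ c :: suf = (pre ++ [c]) ++ suf := by simp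
    rw [this]
    have hlen : (pre ++ [c]).length = pre.length + 1 := by simp
    rw [← hlen, List.drop_left]
  rw [hdrop, PySem.List.foldl_append_if_eq_filter]
  have hpred : (fun o => PySem.Int.mod (o - c) 32 == 0) = (fun o => pvR o == pvR c) :=
    funext fun o => pvCong o c
  rw [hpred]
  rfl

theorem pvStep_eq (xs p s : List Int) (c : Int) (hxs : xs = p ++ c :: s) :
    pvStepA xs (pvAcc xs p) c = pvAcc xs (p ++ [c]) := by
  have hcx : c ∈ xs := by rw [hxs]; simp
  have hRHS : pvAcc xs (p ++ [c])
      = ((PySem.Set.add (PySem.Set.ofList (p.map pvR)) (pvR c)).map (pvGrp xs)).filter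
          (fun g => decide (2 < g.length)) := by
    unfold pvAcc
    rw [List.map_append, show (List.map pvR [c]) = [pvR c] from rfl, PySem.Set.ofList_append_singleton]
  by_cases hin : pvR c ∈ p.map pvR
  · have hadd : pvAcc xs (p ++ [c]) = pvAcc xs p := by
      rw [hRHS, PySem.Set.add_of_mem ((PySem.Set.mem_ofList _ _).mpr hin)]; rfl
    rw [hadd]
    by_cases h3 : 2 < (pvGrp xs (pvR c)).length
    · unfold pvStepA
      rw [if_pos ((pvMem_iff xs p c hcx).mpr ⟨hin, h3⟩)]
    · unfold pvStepA
      rw [if_neg (fun h => absurd ((pvMem_iff xs p c hcx).mp h).2 h3)]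
      -- the group built for c cannot exceed the full residue class, so its length stays ≤ 2
      have hcxs : c ∈ xs := hcx
      obtain ⟨j, hj⟩ : ∃ j, PySem.List.index? xs c = some j := by
        have := (PySem.List.index?_isSome_iff xs c).mpr hcx
        exact Option.isSome_iff_exists.mp this
      obtain ⟨pre, suf, hsplit, hlen, hnp⟩ := (PySem.List.index?_eq_some_iff xs c j).mp hj
      have hmfc := pvMFC xs c j pre suf hsplit hlen hnp
      simp only [hmfc]
      have hle : ¬ (c :: suf.filter (fun o => pvR o == pvR c)).length > 2 := by
        intro hgt
        apply h3
        have : (pvGrp xs (pvR c)).length = (pre.filter (fun x => pvR x == pvR c)).length + 1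
            + (suf.filter (fun o => pvR o == pvR c)).length := by
          unfold pvGrp
          rw [hsplit, List.filter_append, List.length_append, List.filter_cons]
          simp
          omega
        simp only [List.length_cons] at hgt
        omega
      rw [if_neg hle]
  · have hadd : pvAcc xs (p ++ [c]) = pvAcc xs p
        ++ (if 2 < (pvGrp xs (pvR c)).length then [pvGrp xs (pvR c)] else []) := by
      rw [hRHS, PySem.Set.add_of_not_mem (fun h => hin ((PySem.Set.mem_ofList _ _).mp h))]
      rw [List.map_append, List.filter_append]
      unfold pvAcc
      congr 1
      simp [List.filter_cons]
    have hcnp : c ∉ p := fun h => hin (List.mem_map.mpr ⟨c, h, rfl⟩)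
    have hmfc := pvMFC xs c p.length p s hxs rfl hcnp
    have hgrp : pvGrp xs (pvR c) = c :: s.filter (fun o => pvR o == pvR c) := by
      unfold pvGrp
      rw [hxs, List.filter_append, List.filter_cons]
      have hpf : p.filter (fun x => pvR x == pvR c) = [] := by
        rw [List.filter_eq_nil_iff]
        intro a ha hra
        exact hin (List.mem_map.mpr ⟨a, ha, by simpa using hra⟩)
      simp [hpf]
    unfold pvStepA
    rw [if_neg (fun h => hin ((pvMem_iff xs p c hcx).mp h).1)]
    simp only [hmfc]
    rw [hadd, ← hgrp]
    by_cases h3 : 2 < (pvGrp xs (pvR c)).length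
    · rw [if_pos (by omega), if_pos h3]
    · rw [if_neg (by omega), if_neg h3]; simp

theorem pvMain (xs : List Int) : ∀ (s p : List Int), xs = p ++ s →
    s.foldl (pvStepA xs) (pvAcc xs p) = pvAcc xs (p ++ s) := by
  intro s
  induction s with
  | nil => intro p h; simp
  | cons c s' ih =>
      intro p h
      rw [List.foldl_cons, pvStep_eq xs p s' c h, ih (p ++ [c]) (by rw [h]; simp)]
      simp

-- ===== VERDICT (by name: the statement is the Claim_ definition above) =====
theorem CheckMultipleOfProbeCard_spec : Claim_equal_CheckMultipleOfProbeCard := by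
  intro xs _
  unfold Spec_CheckMultipleOfProbeCard
  rw [pvA_eq_foldl, pvAlt_eq]
  have h := pvMain xs xs [] rfl
  simpa [pvAcc] using h
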